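-- pv_equiv track=rewrite | github.com/gotankersley/entropic-transform | lib/combinations.py | comb_rank_to_vals2
-- ===== SOURCE A (Python) =====
-- from math import comb #Binomial coefficient
--
-- def comb_rank_to_vals2(r, n, k):#Zero index
-- 	x = n
-- 	c = [0] * k
-- 	for i in range(0, k):
-- 		while comb(x, k-i) > r:
-- 			x -= 1
-- 		c[k-i-1] = x
-- 		r = r - comb(x, k - i)
-- 	return c
-- ===== SOURCE B (Python) =====
-- from math import comb  # Binomial coefficient
--
--
-- def _find_largest(r, j, hi):
--     """Largest x <= hi with comb(x, j) <= r, located by galloping down from hi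
--     (doubling step) and then binary-searching inside the bracket."""
--     if hi <= j - 1 or comb(hi, j) <= r:
--         return hi
--     step = 1
--     while hi - step > j - 1 and comb(hi - step, j) > r:
--         step *= 2
--     lo = max(hi - step, j - 1)
--     a, b = lo, hi - step // 2 - 1
--     while a < b:
--         m = (a + b + 1) // 2
--         if comb(m, j) <= r:
--             a = m
--         else:
--             b = m - 1
--     return a
--
--
-- def comb_rank_to_vals2(r, n, k):  # Zero index
--     c = []
--     hi = n
--     for i in range(k):
--         j = k - i
--         hi = _find_largest(r, j, hi)
--         c.append(hi)
--         r -= comb(hi, j)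
--     c.reverse()
--     return c
-- ===== Notes on version B (the rewrite author's own statement) =====
-- stated objective: alternative
-- what changed: Per position B gallops down from the previous x with a doubling step and binary-searches the bracket for the largest x with comb(x,j)<=r (appending the values and reversing once), instead of A's one-step decrement loop; measured times are comparable because both are dominated by the per-position comb evaluations.
import Mathlib
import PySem

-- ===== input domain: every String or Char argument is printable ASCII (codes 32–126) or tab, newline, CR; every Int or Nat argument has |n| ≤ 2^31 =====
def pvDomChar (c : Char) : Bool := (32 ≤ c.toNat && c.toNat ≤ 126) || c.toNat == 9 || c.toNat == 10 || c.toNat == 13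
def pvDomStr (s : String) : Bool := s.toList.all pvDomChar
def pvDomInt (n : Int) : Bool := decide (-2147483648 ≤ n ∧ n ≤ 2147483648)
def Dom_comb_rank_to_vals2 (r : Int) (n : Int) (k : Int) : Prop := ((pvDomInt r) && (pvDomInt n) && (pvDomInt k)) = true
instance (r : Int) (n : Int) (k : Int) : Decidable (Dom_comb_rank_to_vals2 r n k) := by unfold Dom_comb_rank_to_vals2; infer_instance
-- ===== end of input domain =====

-- B locates each value by galloping down from the previous x and binary-searching the bracket
-- (appending the values and reversing once) instead of A's one-step decrements.

-- ===== PORT A =====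
-- math.comb(x, j) for x ≥ 0 (Python raises ValueError for x < 0; those inputs are outside Pre_)
def combZ (x j : Int) : Int := if x < 0 then 0 else ((x.toNat.choose j.toNat : Nat) : Int)

-- the 'while comb(x, k-i) > r: x -= 1' loop; fuel (x - j + 2).toNat is exact on Pre_
-- (with r ≥ 0 the loop stops at x = j - 1 at the latest, i.e. after at most x - j + 1 decrements)
def whileDec (r j : Int) : Int → Nat → Int
  | x, 0 => x
  | x, fuel+1 => if r < combZ x j then whileDec r j (x - 1) fuel else x

def stepA (k : Int) (st : Int × Int × List Int) (i : Int) : Int × Int × List Int :=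
  let x := whileDec st.2.1 (k - i) st.1 ((st.1 - (k - i) + 2).toNat)
  (x, st.2.1 - combZ x (k - i), st.2.2.set (k - i - 1).toNat x)

def comb_rank_to_vals2 (r : Int) (n : Int) (k : Int) : List Int :=
  ((PySem.List.pyRange 0 k 1).foldl (stepA k) (n, r, List.replicate k.toNat 0)).2.2

-- ===== PORT B =====
-- 'while hi - step > j - 1 and comb(hi - step, j) > r: step *= 2'
-- fuel (hi - j + 1).toNat is exact: the loop runs only while step < hi - j + 1 and step
-- doubles from 1, and once hi - j + 1 ≤ step the loop condition is false anyway
def gallop (r j hi : Int) : Int → Nat → Int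
  | step, 0 => step
  | step, fuel+1 =>
    if j - 1 < hi - step ∧ r < combZ (hi - step) j then gallop r j hi (step * 2) fuel
    else step

-- 'while a < b: m = (a+b+1)//2; if comb(m,j) <= r: a = m else: b = m-1'
-- fuel (b - a).toNat is exact: each iteration shrinks the gap b - a by at least 1,
-- and once the gap is 0 the loop condition a < b is false anyway
def bsearch (r j : Int) : Int → Int → Nat → Int
  | a, _, 0 => a
  | a, b, fuel+1 =>
    if a < b then
      let m := PySem.Int.floordiv (a + b + 1) 2
      if combZ m j ≤ r then bsearch r j m b fuel else bsearch r j a (m - 1) fuel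
    else a

-- _find_largest(r, j, hi)
def findB (r j hi : Int) : Int :=
  if hi ≤ j - 1 ∨ combZ hi j ≤ r then hi
  else
    let s := gallop r j hi 1 ((hi - j + 1).toNat)
    let lo := max (hi - s) (j - 1)
    bsearch r j lo (hi - PySem.Int.floordiv s 2 - 1)
      ((hi - PySem.Int.floordiv s 2 - 1 - lo).toNat)

def stepB (k : Int) (st : Int × Int × List Int) (i : Int) : Int × Int × List Int :=
  let x := findB st.2.1 (k - i) st.1
  (x, st.2.1 - combZ x (k - i), st.2.2 ++ [x])

def comb_rank_to_vals2_alt (r : Int) (n : Int) (k : Int) : List Int :=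
  (((PySem.List.pyRange 0 k 1).foldl (stepB k) (n, r, [])).2.2).reverse

-- ===== PRECONDITION & SPEC =====
-- Pre_ excludes exactly the inputs on which Python A raises ValueError (math.comb with a negative
-- first argument): k > 0 with n < 0, and k > 0 with r < 0 (the decrement loop drives x below 0).
def Pre_comb_rank_to_vals2 (r : Int) (n : Int) (k : Int) : Prop := k ≤ 0 ∨ (0 ≤ n ∧ 0 ≤ r)
instance (r : Int) (n : Int) (k : Int) : Decidable (Pre_comb_rank_to_vals2 r n k) := by unfold Pre_comb_rank_to_vals2; infer_instance
def pvWitness_comb_rank_to_vals2 : Int × Int × Int := (3, 5, 2)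

def Spec_comb_rank_to_vals2 (r : Int) (n : Int) (k : Int) (out : List Int) : Prop := out = comb_rank_to_vals2_alt r n k
instance (r : Int) (n : Int) (k : Int) (out : List Int) : Decidable (Spec_comb_rank_to_vals2 r n k out) := by unfold Spec_comb_rank_to_vals2; infer_instance

-- ===== CLAIM (what is proved, stated in full; the proofs are below) =====
def Claim_equal_comb_rank_to_vals2 : Prop := ∀ (r : Int) (n : Int) (k : Int), Dom_comb_rank_to_vals2 r n k → Pre_comb_rank_to_vals2 r n k → Spec_comb_rank_to_vals2 r n k (comb_rank_to_vals2 r n k)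

-- ===== LEMMAS AND PROOFS =====

lemma combZ_mono {x1 x2 : Int} (j : Int) (h : x1 ≤ x2) : combZ x1 j ≤ combZ x2 j := by
  unfold combZ
  split_ifs with h1 h2
  · exact le_refl 0
  · omega
  · omega
  · exact_mod_cast Nat.choose_le_choose j.toNat (by omega)

lemma combZ_eq_zero {x j : Int} (hj : 1 ≤ j) (hx : x ≤ j - 1) : combZ x j = 0 := by
  unfold combZ
  split_ifs with h1
  · rfl
  · have : x.toNat < j.toNat := by omega
    simp [Nat.choose_eq_zero_of_lt this]

-- characterization of each step's result: the largest y ≤ x0 with combZ y j ≤ r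
def IsRes (r j x0 y : Int) : Prop :=
  y ≤ x0 ∧ combZ y j ≤ r ∧ ∀ z : Int, y < z → z ≤ x0 → r < combZ z j

lemma IsRes_unique {r j x0 y1 y2 : Int} (h1 : IsRes r j x0 y1) (h2 : IsRes r j x0 y2) : y1 = y2 := by
  obtain ⟨a1, b1, c1⟩ := h1
  obtain ⟨a2, b2, c2⟩ := h2
  by_contra hne
  rcases lt_or_gt_of_ne hne with h | h
  · exact absurd b2 (not_le.mpr (c1 y2 h a2))
  · exact absurd b1 (not_le.mpr (c2 y1 h a1))

lemma whileDec_spec {r j : Int} (hr : 0 ≤ r) (hj : 1 ≤ j) :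
    ∀ (fuel : Nat) (x0 : Int), x0 - j + 1 ≤ (fuel : Int) →
      IsRes r j x0 (whileDec r j x0 fuel) := by
  intro fuel
  induction fuel with
  | zero =>
    intro x0 hf
    simp only [whileDec]
    exact ⟨le_refl _, by rw [combZ_eq_zero hj (by omega)]; exact hr,
           fun z h1 h2 => absurd h2 (not_le.mpr h1)⟩
  | succ fuel IH =>
    intro x0 hf
    simp only [whileDec]
    split_ifs with hc
    · obtain ⟨h1, h2, h3⟩ := IH (x0 - 1) (by push_cast at hf ⊢; omega)
      refine ⟨by omega, h2, ?_⟩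
      intro z hz1 hz2
      rcases eq_or_lt_of_le hz2 with he | hl
      · rw [he]; exact hc
      · exact h3 z hz1 (by omega)
    · exact ⟨le_refl _, by omega, fun z h1 h2 => absurd h2 (not_le.mpr h1)⟩

lemma bsearch_spec {r j : Int} (x0 : Int) :
    ∀ (fuel : Nat) (a b : Int), b - a ≤ (fuel : Int) → combZ a j ≤ r → a ≤ b → b ≤ x0 →
      (∀ z : Int, b < z → z ≤ x0 → r < combZ z j) → IsRes r j x0 (bsearch r j a b fuel) := by
  intro fuel
  induction fuel with
  | zero =>
    intro a b hf ha hab hbx hout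
    have hab' : a = b := by omega
    subst hab'
    simp only [bsearch]
    exact ⟨hbx, ha, fun z h1 h2 => hout z h1 h2⟩
  | succ fuel IH =>
    intro a b hf ha hab hbx hout
    simp only [bsearch]
    split_ifs with hlt hcm
    · have hm := PySem.Int.floordiv_two_mid_bounds (lo := a + 1) (hi := b) (by omega)
      rw [show a + 1 + b = a + b + 1 by ring] at hm
      exact IH _ b (by push_cast at hf ⊢; omega) hcm (by omega) hbx hout
    · have hm := PySem.Int.floordiv_two_mid_bounds (lo := a + 1) (hi := b) (by omega)
      rw [show a + 1 + b = a + b + 1 by ring] at hm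
      refine IH a _ (by push_cast at hf ⊢; omega) ha (by omega) (by omega) ?_
      intro z hz1 hz2
      by_cases hzb : z ≤ b
      · have := combZ_mono (x1 := PySem.Int.floordiv (a + b + 1) 2) (x2 := z) j (by omega)
        omega
      · exact hout z (by omega) hz2
    · exact ⟨le_trans hab hbx, ha, fun z h1 h2 => hout z (by omega) h2⟩

lemma gallop_spec {r j hi : Int} :
    ∀ (fuel : Nat) (step : Int), 1 ≤ step → hi - j + 1 ≤ step * 2 ^ fuel →
      j - 1 < hi - PySem.Int.floordiv step 2 →
      (∀ z : Int, hi - PySem.Int.floordiv step 2 ≤ z → z ≤ hi → r < combZ z j) →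
      1 ≤ gallop r j hi step fuel ∧
      ¬ (j - 1 < hi - gallop r j hi step fuel ∧ r < combZ (hi - gallop r j hi step fuel) j) ∧
      j - 1 < hi - PySem.Int.floordiv (gallop r j hi step fuel) 2 ∧
      (∀ z : Int, hi - PySem.Int.floordiv (gallop r j hi step fuel) 2 ≤ z → z ≤ hi → r < combZ z j) := by
  intro fuel
  induction fuel with
  | zero =>
    intro step h1 hbound hup hinv
    simp only [gallop]
    exact ⟨h1, fun hc => by omega, hup, hinv⟩
  | succ fuel IH =>
    intro step h1 hbound hup hinv
    simp only [gallop]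
    split_ifs with hc
    · have hdiv : PySem.Int.floordiv (step * 2) 2 = step := by
        rw [PySem.Int.floordiv_eq_ediv_of_pos (by omega)]
        omega
      refine IH (step * 2) (by omega) (by rw [show step * 2 * 2 ^ fuel = step * 2 ^ (fuel + 1) from by ring]; exact hbound) ?_ ?_
      · rw [hdiv]; exact hc.1
      · rw [hdiv]
        intro z hz1 hz2
        have := combZ_mono (x1 := hi - step) (x2 := z) j (by omega)
        omega
    · exact ⟨h1, hc, hup, hinv⟩

lemma findB_isres {r j : Int} (x0 : Int) (hr : 0 ≤ r) (hj : 1 ≤ j) :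
    IsRes r j x0 (findB r j x0) := by
  unfold findB
  split_ifs with hc
  · refine ⟨le_refl _, ?_, fun z h1 h2 => absurd h2 (not_le.mpr h1)⟩
    rcases hc with h | h
    · rw [combZ_eq_zero hj h]; exact hr
    · exact h
  · obtain ⟨hx0', hcomb'⟩ := not_or.mp hc
    have hx0 : j - 1 < x0 := by omega
    have hcomb : r < combZ x0 j := by omega
    have hgal := gallop_spec (r := r) (j := j) (hi := x0) ((x0 - j + 1).toNat) 1 (le_refl 1)
      (by
        have h2 : ((x0 - j + 1).toNat : Int) < 2 ^ (x0 - j + 1).toNat := by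
          exact_mod_cast Nat.lt_two_pow_self
        omega)
      (by simp [PySem.Int.floordiv]; omega)
      (by
        simp only [show PySem.Int.floordiv 1 2 = 0 from rfl, sub_zero]
        intro z hz1 hz2
        have : z = x0 := le_antisymm hz2 hz1
        rw [this]; omega)
    obtain ⟨hs1, hnc, hup, hinv⟩ := hgal
    have hdiv : PySem.Int.floordiv (gallop r j x0 1 ((x0 - j + 1).toNat)) 2
        = gallop r j x0 1 ((x0 - j + 1).toNat) / 2 :=
      PySem.Int.floordiv_eq_ediv_of_pos (by omega)
    rw [hdiv] at hup hinv
    refine bsearch_spec x0 _ _ _ (by rw [hdiv]; omega) ?_ ?_ ?_ ?_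
    · -- combZ lo j ≤ r
      by_cases hcase : j - 1 < x0 - gallop r j x0 1 ((x0 - j + 1).toNat)
      · rw [max_eq_left (by omega)]
        omega
      · rw [max_eq_right (by omega)]
        rw [combZ_eq_zero hj (le_refl _)]; exact hr
    · -- lo ≤ b
      rw [hdiv]
      rcases max_cases (x0 - gallop r j x0 1 ((x0 - j + 1).toNat)) (j - 1) with ⟨he, _⟩ | ⟨he, _⟩ <;>
        rw [he] <;> omega
    · rw [hdiv]; omega
    · rw [hdiv]
      intro z hz1 hz2
      exact hinv z (by omega) hz2

lemma step_eq {r j : Int} (x0 : Int) (hr : 0 ≤ r) (hj : 1 ≤ j) :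
    whileDec r j x0 ((x0 - j + 2).toNat) = findB r j x0 :=
  IsRes_unique (whileDec_spec hr hj ((x0 - j + 2).toNat) x0 (by omega)) (findB_isres x0 hr hj)

lemma set_replicate_append (t : Nat) (x : Int) (acc : List Int) :
    (List.replicate (t + 1) (0 : Int) ++ acc).set t x = List.replicate t 0 ++ x :: acc := by
  induction t with
  | zero => simp
  | succ t IH =>
    rw [List.replicate_succ, List.cons_append, List.set_cons_succ, IH,
        List.replicate_succ, List.cons_append]

lemma loop_eq (k : Int) :
    ∀ (t : Nat) (i0 x r : Int) (accB : List Int), 0 ≤ r → i0 ≤ k → t = (k - i0).toNat →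
      (PySem.List.pyRange i0 k 1).foldl (stepA k) (x, r, List.replicate t 0 ++ accB.reverse)
        = (((PySem.List.pyRange i0 k 1).foldl (stepB k) (x, r, accB)).1,
           ((PySem.List.pyRange i0 k 1).foldl (stepB k) (x, r, accB)).2.1,
           ((PySem.List.pyRange i0 k 1).foldl (stepB k) (x, r, accB)).2.2.reverse) := by
  intro t
  induction t with
  | zero =>
    intro i0 x r accB hr hik ht
    have : i0 = k := by omega
    subst this
    rw [PySem.List.pyRange_one_eq_nil (le_refl i0)]
    simp
  | succ t IH =>
    intro i0 x r accB hr hik ht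
    have hlt : i0 < k := by omega
    have hj : 1 ≤ k - i0 := by omega
    rw [PySem.List.pyRange_one_cons hlt]
    simp only [List.foldl_cons]
    have hstep := step_eq (r := r) (j := k - i0) x hr hj
    have hset : (k - i0 - 1).toNat = t := by omega
    show (PySem.List.pyRange (i0 + 1) k 1).foldl (stepA k)
          (stepA k (x, r, List.replicate (t + 1) 0 ++ accB.reverse) i0)
        = (((PySem.List.pyRange (i0 + 1) k 1).foldl (stepB k) (stepB k (x, r, accB) i0)).1,
           ((PySem.List.pyRange (i0 + 1) k 1).foldl (stepB k) (stepB k (x, r, accB) i0)).2.1,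
           ((PySem.List.pyRange (i0 + 1) k 1).foldl (stepB k) (stepB k (x, r, accB) i0)).2.2.reverse)
    unfold stepA stepB
    simp only [hset]
    rw [set_replicate_append, hstep]
    rw [show findB r (k - i0) x :: accB.reverse = (accB ++ [findB r (k - i0) x]).reverse by simp]
    exact IH (i0 + 1) _ _ _
      (by have := (findB_isres (r := r) (j := k - i0) x hr hj).2.1; omega) (by omega) (by omega)

-- ===== VERDICT (by name: the statement is the Claim_ definition above) =====
theorem comb_rank_to_vals2_spec : Claim_equal_comb_rank_to_vals2 := by
  unfold Claim_equal_comb_rank_to_vals2 Spec_comb_rank_to_vals2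
  intro r n k hdom hpre
  unfold comb_rank_to_vals2 comb_rank_to_vals2_alt
  by_cases hk : k ≤ 0
  · rw [PySem.List.pyRange_one_eq_nil hk]
    simp [Int.toNat_of_nonpos hk]
  · have hnr : 0 ≤ n ∧ 0 ≤ r := by
      rcases hpre with h | h
      · exact absurd h hk
      · exact h
    have h := loop_eq k k.toNat 0 n r [] hnr.2 (by omega) (by omega)
    rw [List.reverse_nil, List.append_nil] at h
    rw [h]
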